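-- pv_equiv track=rewrite | github.com/princepal9120/ai-learning | mcp/mcp_journlist/utils.py | extract_headlines
-- ===== SOURCE A (Python) =====
-- def extract_headlines(cleaned_text: str)-> str:
--     """
--     Extract and concatentat headlines from cleaned news text content.
--
--     Args:
--         cleaned_text: Raw tex from news page after HTML cleaning
--
--     Returns:
--     str: combined headlines seprated by newlines
--     """
--
--     headlines =[]
--     current_block=[]
--
--     lines=[line.strip() for line in cleaned_text.split('\n') if line.strip()]
--
--     for line in lines:
--         if line=="MOre":
--             if current_block:
--                 #First line of block is headline
--                 headlines.append(current_block[0])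
--
--                 current_block=[]
--
--         else:
--             current_block.append(line)
--
--     if current_block:
--         headlines.append(current_block[0])
--
--
--     return "\n".join(headlines)
-- ===== SOURCE B (Python) =====
-- def extract_headlines(cleaned_text: str) -> str:
--     lines = [line.strip() for line in cleaned_text.split('\n') if line.strip()]
--     headlines = []
--     i = 0
--     n = len(lines)
--     while i < n:
--         if lines[i] == "MOre":
--             i += 1
--         else:
--             headlines.append(lines[i])
--             i += 1
--             while i < n and lines[i] != "MOre":
--                 i += 1
--     return "\n".join(headlines)
-- ===== Notes on version B (the rewrite author's own statement) =====
-- stated objective: simpler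
-- what changed: Replaces A's accumulate-and-reset current_block buffer (which collects every line of a block only to use its first element) with a single index scan that records the first line after each delimiter run and then skips ahead to the next 'MOre' marker, never building block lists.
import Mathlib
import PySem

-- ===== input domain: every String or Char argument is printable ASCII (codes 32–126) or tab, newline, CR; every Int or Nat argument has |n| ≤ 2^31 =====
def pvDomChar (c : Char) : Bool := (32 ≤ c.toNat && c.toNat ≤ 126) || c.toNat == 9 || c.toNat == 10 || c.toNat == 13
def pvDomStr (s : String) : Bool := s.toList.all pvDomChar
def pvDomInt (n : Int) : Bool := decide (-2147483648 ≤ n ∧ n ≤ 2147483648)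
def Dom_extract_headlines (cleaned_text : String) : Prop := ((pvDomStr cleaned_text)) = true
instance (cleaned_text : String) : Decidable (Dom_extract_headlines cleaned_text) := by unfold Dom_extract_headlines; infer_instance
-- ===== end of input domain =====

-- B replaces A's accumulate-and-reset block buffer with an index scan that records the
-- first line after each delimiter run and skips the rest of the block (objective: simpler).

-- ===== PORT A =====
-- lines = [line.strip() for line in cleaned_text.split('\n') if line.strip()]
def pvLines (cleaned_text : String) : List String :=
  (((PySem.Str.split? cleaned_text "\n").getD []).filter
      (fun line => !(PySem.Str.strip line == ""))).map (fun line => PySem.Str.strip line)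

-- one iteration of A's for-loop over state (headlines, current_block)
def pvAStep (st : List String × List String) (line : String) : List String × List String :=
  if line == "MOre" then
    match st.2 with
    | [] => st
    | x :: _ => (st.1 ++ [x], [])
  else (st.1, st.2 ++ [line])

def extract_headlines (cleaned_text : String) : String :=
  let st := (pvLines cleaned_text).foldl pvAStep ([], [])
  let headlines :=
    match st.2 with
    | [] => st.1
    | x :: _ => st.1 ++ [x]
  PySem.Str.join "\n" headlines

-- ===== PORT B =====
-- the while-loop of Source B: skip "MOre" markers; otherwise record the line and skip to the next marker
def pvBScan : List String → List String
  | [] => []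
  | l :: rest =>
    if l == "MOre" then pvBScan rest
    else l :: pvBScan (rest.dropWhile (fun x => !(x == "MOre")))
termination_by xs => xs.length
decreasing_by
  · simp
  · have := List.length_dropWhile_le (fun x => !(x == "MOre")) rest
    simp
    omega

def extract_headlines_alt (cleaned_text : String) : String :=
  PySem.Str.join "\n" (pvBScan (pvLines cleaned_text))

-- ===== PRECONDITION & SPEC =====
def Spec_extract_headlines (cleaned_text : String) (out : String) : Prop := out = extract_headlines_alt cleaned_text
instance (cleaned_text : String) (out : String) : Decidable (Spec_extract_headlines cleaned_text out) := by unfold Spec_extract_headlines; infer_instance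

-- ===== CLAIM (what is proved, stated in full; the proofs are below) =====
def Claim_equal_extract_headlines : Prop := ∀ (cleaned_text : String), Dom_extract_headlines cleaned_text → Spec_extract_headlines cleaned_text (extract_headlines cleaned_text)

-- ===== LEMMAS AND PROOFS =====

-- A's final flush of the pending block
def pvFinish (st : List String × List String) : List String :=
  match st.2 with
  | [] => st.1
  | x :: _ => st.1 ++ [x]

lemma pvMain (lines : List String) : ∀ (h cb : List String),
    pvFinish (lines.foldl pvAStep (h, cb)) =
      h ++ (match cb with
            | [] => pvBScan lines
            | x :: _ => x :: pvBScan (lines.dropWhile (fun l => !(l == "MOre")))) := by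
  induction lines with
  | nil =>
    intro h cb
    cases cb with
    | nil => simp [pvFinish, pvBScan]
    | cons x _ => simp [pvFinish, pvBScan]
  | cons l rest ih =>
    intro h cb
    by_cases hl : l == "MOre"
    · have hls : l = "MOre" := by simpa using hl
      cases cb with
      | nil =>
        simp [List.foldl_cons, pvAStep, hl, ih, pvBScan, hls]
      | cons x cb' =>
        simp [List.foldl_cons, pvAStep, hl, ih, pvBScan, hls, List.dropWhile]
    · cases cb with
      | nil =>
        simp [List.foldl_cons, pvAStep, hl, ih, pvBScan, List.dropWhile]
      | cons x cb' =>
        have : cb' ++ [l] ≠ [] := by simp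
        simp [List.foldl_cons, pvAStep, hl, ih, pvBScan, List.dropWhile]

-- ===== VERDICT (by name: the statement is the Claim_ definition above) =====
theorem extract_headlines_spec : Claim_equal_extract_headlines := by
  intro cleaned_text _
  unfold Spec_extract_headlines extract_headlines extract_headlines_alt
  have := pvMain (pvLines cleaned_text) [] []
  simp only [pvFinish] at this
  simp only []
  rw [show (match ((pvLines cleaned_text).foldl pvAStep ([], [])).2 with
        | [] => ((pvLines cleaned_text).foldl pvAStep ([], [])).1
        | x :: _ => ((pvLines cleaned_text).foldl pvAStep ([], [])).1 ++ [x])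
      = pvFinish ((pvLines cleaned_text).foldl pvAStep ([], [])) from rfl]
  rw [pvMain]
  simp
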